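-- pv_equiv track=rewrite | github.com/hieu-delta/Cloud-Work | Python/CodePTIT/PY01039.py | check
-- ===== SOURCE A (Python) =====
-- def check(s):
--     if (len(s) < 2):
--         return "NO"
--     for i in range(2,len(s)):
--         if (s[i] != s[i-2]):
--             return "NO"
--     for i in range(3,len(s)):
--         if (s[i] != s[i-2]):
--             return "NO"
--     return "YES"
-- ===== SOURCE B (Python) =====
-- def check(s):
--     if len(s) < 2:
--         return "NO"
--     return "YES" if len(set(s[0::2])) <= 1 and len(set(s[1::2])) <= 1 else "NO"
-- ===== Notes on version B (the rewrite author's own statement) =====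
-- stated objective: simpler
-- what changed: Replaces the two Python-level index loops comparing s[i] with s[i-2] by splitting the string into its two parity slices and checking each forms a set of at most one distinct character.
import Mathlib
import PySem

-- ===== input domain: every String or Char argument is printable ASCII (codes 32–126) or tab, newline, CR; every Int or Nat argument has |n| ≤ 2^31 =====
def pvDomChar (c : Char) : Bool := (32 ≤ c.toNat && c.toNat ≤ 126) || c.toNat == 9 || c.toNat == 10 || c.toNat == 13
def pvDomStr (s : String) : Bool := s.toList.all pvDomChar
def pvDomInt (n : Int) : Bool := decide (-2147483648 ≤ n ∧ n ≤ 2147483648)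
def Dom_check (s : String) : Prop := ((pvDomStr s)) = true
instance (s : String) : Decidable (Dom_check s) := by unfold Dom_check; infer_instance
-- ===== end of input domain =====

-- B replaces A's two index loops by parity slices each checked to hold ≤ 1 distinct character (objective: simpler).

-- ===== PORT A =====
-- the body of 'for i in range(i0, len(s)): if s[i] != s[i-2]: return "NO"' (early return = some "NO")
def checkLoop (cs : List Char) (i : Nat) : Option String :=
  if i < cs.length then
    if cs[i]? ≠ cs[i-2]? then some "NO" else checkLoop cs (i+1)
  else none
termination_by cs.length - i

def check (s : String) : String :=
  let cs := s.toList
  if cs.length < 2 then "NO"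
  else
    match checkLoop cs 2 with
    | some r => r
    | none =>
      match checkLoop cs 3 with
      | some r => r
      | none => "YES"

-- ===== PORT B =====
def check_alt (s : String) : String :=
  let cs := s.toList
  if cs.length < 2 then "NO"
  else
    if (PySem.Set.ofList ((PySem.List.slice? cs (some 0) none 2).getD [])).length ≤ 1
       ∧ (PySem.Set.ofList ((PySem.List.slice? cs (some 1) none 2).getD [])).length ≤ 1
    then "YES" else "NO"

-- ===== PRECONDITION & SPEC =====
def Spec_check (s : String) (out : String) : Prop := out = check_alt s
instance (s : String) (out : String) : Decidable (Spec_check s out) := by unfold Spec_check; infer_instance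

-- ===== CLAIM (what is proved, stated in full; the proofs are below) =====
def Claim_equal_check : Prop := ∀ (s : String), Dom_check s → Spec_check s (check s)

-- ===== LEMMAS AND PROOFS =====

def evens : List Char → List Char
  | [] => []
  | [a] => [a]
  | a :: _ :: t => a :: evens t

theorem evens_getElem? (cs : List Char) (k : Nat) : (evens cs)[k]? = cs[2*k]? := by
  induction cs using evens.induct generalizing k with
  | case1 => simp [evens]
  | case2 a =>
    cases k with
    | zero => simp [evens]
    | succ k =>
      have h1 : (evens [a])[k+1]? = none := by simp [evens]
      have h2 : [a][2*(k+1)]? = none := by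
        rw [List.getElem?_eq_none_iff]; simp; omega
      rw [h1, h2]
  | case3 a b t ih =>
    cases k with
    | zero => simp [evens]
    | succ k =>
      have h2 : 2 * (k+1) = (2*k)+1+1 := by omega
      simp [evens, h2, List.getElem?_cons_succ, ih]

theorem filterMap_evens (cs : List Char) :
    List.filterMap (fun k => cs[2*k]?) (List.range ((cs.length+1)/2)) = evens cs := by
  induction cs using evens.induct with
  | case1 => simp [evens]
  | case2 a => simp [evens]
  | case3 a b t ih =>
    have hl : ((a :: b :: t).length + 1)/2 = (t.length+1)/2 + 1 := by simp; omega
    rw [hl, List.range_succ_eq_map, List.filterMap_cons, List.filterMap_map]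
    have hf : ((fun k => (a :: b :: t)[2*k]?) ∘ Nat.succ) = (fun k => t[2*k]?) := by
      funext k
      have h2 : 2 * Nat.succ k = (2*k)+1+1 := by omega
      simp [h2, List.getElem?_cons_succ]
    simp only [hf, ih]
    simp [evens]

theorem slice?_even (cs : List Char) :
    PySem.List.slice? cs (some 0) none 2 = some (evens cs) := by
  simp only [PySem.List.slice?, PySem.List.sliceIndices]
  norm_num
  have hc : (if 0 < cs.length then (((cs.length:Int) + 2 - 1) / 2).toNat else 0) = (cs.length+1)/2 := by
    split <;> omega
  rw [hc]
  have hf : (fun (x:Nat) => cs[(2 * (x:Int)).toNat]?) = fun x => cs[2*x]? := by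
    funext x
    have h : ((2:Int) * (x:Int)).toNat = 2*x := by omega
    rw [h]
  rw [hf]
  rw [filterMap_evens]

theorem slice?_odd (cs : List Char) :
    PySem.List.slice? cs (some 1) none 2 = some (evens cs.tail) := by
  cases cs with
  | nil => rfl
  | cons a t =>
    simp only [PySem.List.slice?, PySem.List.sliceIndices]
    norm_num
    have hc : (if 0 < t.length then (((t.length:Int) + 2 - 1) / 2).toNat else 0) = (t.length+1)/2 := by
      split <;> omega
    rw [hc]
    have hf : (fun (x:Nat) => (a :: t)[((1:Int) + 2 * (x:Int)).toNat]?) = fun x => t[2*x]? := by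
      funext x
      have h : ((1:Int) + 2 * (x:Int)).toNat = 2*x + 1 := by omega
      rw [h, List.getElem?_cons_succ]
    rw [hf, filterMap_evens]

def AllEq (l : List Char) : Prop := ∀ a ∈ l, ∀ b ∈ l, a = b

theorem setLen_le_one_iff (l : List Char) :
    (PySem.Set.ofList l).length ≤ 1 ↔ AllEq l := by
  constructor
  · intro h a ha b hb
    rw [← PySem.Set.mem_ofList] at ha hb
    cases hm : PySem.Set.ofList l with
    | nil => rw [hm] at ha; simp at ha
    | cons x xs =>
      rw [hm] at ha hb h
      have hx : xs = [] := by
        have : (x :: xs).length = xs.length + 1 := by simp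
        exact List.eq_nil_of_length_eq_zero (by omega)
      subst hx
      simp at ha hb; rw [ha, hb]
  · intro h
    by_contra hlen
    push Not at hlen
    have hnd := PySem.Set.nodup_ofList (xs := l)
    cases hm : PySem.Set.ofList l with
    | nil => rw [hm] at hlen; simp at hlen
    | cons x xs =>
      cases xs with
      | nil => rw [hm] at hlen; simp at hlen
      | cons y ys =>
        rw [hm] at hnd
        have hx : x ∈ l := by rw [← PySem.Set.mem_ofList, hm]; simp
        have hy : y ∈ l := by rw [← PySem.Set.mem_ofList, hm]; simp
        have := h x hx y hy
        simp [this] at hnd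


def Q (cs : List Char) (i : Nat) : Prop := ∀ j, i ≤ j → j < cs.length → cs[j]? = cs[j-2]?

theorem checkLoop_none_iff (cs : List Char) (i : Nat) : checkLoop cs i = none ↔ Q cs i := by
  induction i using checkLoop.induct (cs := cs) with
  | case1 i hlt hne =>
    rw [checkLoop, if_pos hlt, if_pos hne]
    constructor
    · intro h; exact absurd h (by simp)
    · intro hq; exact absurd (hq i le_rfl hlt) hne
  | case2 i hlt hne ih =>
    rw [checkLoop, if_pos hlt, if_neg hne, ih]
    constructor
    · intro hq j hij hjl
      rcases Nat.eq_or_lt_of_le hij with h | h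
      · rw [← h]; exact not_not.mp hne
      · exact hq j h hjl
    · intro hq j hij hjl
      exact hq j (by omega) hjl
  | case3 i hnlt =>
    rw [checkLoop]
    simp [hnlt, Q]
    intro j h1 h2; omega

theorem checkLoop_some (cs : List Char) (i : Nat) (r : String)
    (h : checkLoop cs i = some r) : r = "NO" := by
  induction i using checkLoop.induct (cs := cs) with
  | case1 i hlt hne =>
    rw [checkLoop, if_pos hlt, if_pos hne] at h
    exact (Option.some_inj.mp h).symm
  | case2 i hlt hne ih =>
    rw [checkLoop, if_pos hlt, if_neg hne] at h
    exact ih h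
  | case3 i hnlt =>
    rw [checkLoop, if_neg hnlt] at h
    cases h

theorem chainQ (cs : List Char) (hq : Q cs 2) (d k : Nat) (h : d + 2*k < cs.length) :
    cs[d + 2*k]? = cs[d]? := by
  induction k with
  | zero => simp
  | succ k ih =>
    have h1 : d + 2*(k+1) = (d + 2*k) + 2 := by omega
    have h2 := hq (d + 2*k + 2) (by omega) (by omega)
    have h3 : d + 2*k + 2 - 2 = d + 2*k := by omega
    rw [h1, h2, h3, ih (by omega)]

theorem mem_evens_iff (cs : List Char) (x : Char) : x ∈ evens cs ↔ ∃ k, cs[2*k]? = some x := by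
  rw [List.mem_iff_getElem?]
  constructor
  · rintro ⟨k, hk⟩; exact ⟨k, by rw [← evens_getElem?]; exact hk⟩
  · rintro ⟨k, hk⟩; exact ⟨k, by rw [evens_getElem?]; exact hk⟩

theorem Q_iff_allEq (cs : List Char) :
    Q cs 2 ↔ (AllEq (evens cs) ∧ AllEq (evens cs.tail)) := by
  constructor
  · intro hq
    constructor
    · intro a ha b hb
      rw [mem_evens_iff] at ha hb
      obtain ⟨k, hk⟩ := ha
      obtain ⟨l, hl⟩ := hb
      have hkl : 2*k < cs.length := by rcases List.getElem?_eq_some_iff.mp hk with ⟨h, _⟩; exact h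
      have hll : 2*l < cs.length := by rcases List.getElem?_eq_some_iff.mp hl with ⟨h, _⟩; exact h
      have e1 : cs[2*k]? = cs[0]? := by
        have := chainQ cs hq 0 k (by omega); simpa using this
      have e2 : cs[2*l]? = cs[0]? := by
        have := chainQ cs hq 0 l (by omega); simpa using this
      rw [e1] at hk; rw [e2] at hl
      exact Option.some_inj.mp (hk.symm.trans hl)
    · intro a ha b hb
      rw [mem_evens_iff] at ha hb
      obtain ⟨k, hk⟩ := ha
      obtain ⟨l, hl⟩ := hb
      rw [List.getElem?_tail] at hk hl
      have hkl : 2*k + 1 < cs.length := by rcases List.getElem?_eq_some_iff.mp hk with ⟨h, _⟩; exact h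
      have hll : 2*l + 1 < cs.length := by rcases List.getElem?_eq_some_iff.mp hl with ⟨h, _⟩; exact h
      have e1 : cs[1 + 2*k]? = cs[1]? := chainQ cs hq 1 k (by omega)
      have e2 : cs[1 + 2*l]? = cs[1]? := chainQ cs hq 1 l (by omega)
      rw [show 2*k+1 = 1+2*k by omega, e1] at hk
      rw [show 2*l+1 = 1+2*l by omega, e2] at hl
      exact Option.some_inj.mp (hk.symm.trans hl)
  · rintro ⟨he, ho⟩ j hij hjl
    have hj2 : j - 2 < cs.length := by omega
    have hx : cs[j]? = some cs[j] := List.getElem?_eq_getElem hjl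
    have hy : cs[j-2]? = some (cs[j-2]'hj2) := List.getElem?_eq_getElem hj2
    rw [hx, hy]
    rcases Nat.even_or_odd j with hpar | hpar
    · obtain ⟨m, hm⟩ := hpar
      have hxm : cs[j] ∈ evens cs := (mem_evens_iff cs _).mpr ⟨m, by rw [show 2*m = j by omega]; exact hx⟩
      have hym : cs[j-2]'hj2 ∈ evens cs := (mem_evens_iff cs _).mpr ⟨m-1, by rw [show 2*(m-1) = j-2 by omega]; exact hy⟩
      rw [he _ hxm _ hym]
    · obtain ⟨m, hm⟩ := hpar
      have hxm : cs[j] ∈ evens cs.tail := (mem_evens_iff _ _).mpr ⟨m, by rw [List.getElem?_tail, show 2*m+1 = j by omega]; exact hx⟩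
      have hym : cs[j-2]'hj2 ∈ evens cs.tail := (mem_evens_iff _ _).mpr ⟨m-1, by rw [List.getElem?_tail, show 2*(m-1)+1 = j-2 by omega]; exact hy⟩
      rw [ho _ hxm _ hym]

-- ===== VERDICT (by name: the statement is the Claim_ definition above) =====
theorem check_spec : Claim_equal_check := by
  intro s _
  unfold Spec_check check check_alt
  simp only [slice?_even, slice?_odd, Option.getD_some]
  set cs := s.toList with hcs
  by_cases hlen : cs.length < 2
  · simp [hlen]
  · simp only [hlen, if_false]
    cases hc : checkLoop cs 2 with
    | some r =>
      have hr := checkLoop_some cs 2 r hc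
      have hq : ¬ Q cs 2 := by
        intro hq
        rw [← checkLoop_none_iff] at hq
        simp [hq] at hc
      rw [Q_iff_allEq cs] at hq
      have : ¬ ((PySem.Set.ofList (evens cs)).length ≤ 1 ∧ (PySem.Set.ofList (evens cs.tail)).length ≤ 1) := by
        rw [setLen_le_one_iff, setLen_le_one_iff]; exact hq
      simp [this, hr]
    | none =>
      have hq : Q cs 2 := (checkLoop_none_iff cs 2).mp hc
      have hq3 : Q cs 3 := fun j h3 hl => hq j (by omega) hl
      have hc3 : checkLoop cs 3 = none := (checkLoop_none_iff cs 3).mpr hq3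
      rw [Q_iff_allEq cs] at hq
      have : ((PySem.Set.ofList (evens cs)).length ≤ 1 ∧ (PySem.Set.ofList (evens cs.tail)).length ≤ 1) := by
        rw [setLen_le_one_iff, setLen_le_one_iff]; exact hq
      simp [hc3, this]
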